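-- pv_equiv track=rewrite | github.com/moreiratrader/BeecrowdResolucoes | Iniciante - Python/1848 corvo contador.py | blink_crow
-- ===== SOURCE A (Python) =====
-- def blink_crow(list_):
--     map_binary = {
--         '---': 0,
--         '--*': 1,
--         '-*-': 2,
--         '-**': 3,
--         '*--': 4,
--         '*-*': 5,
--         '**-': 6,
--         '***': 7
--     }
--     result = []
--     _sum = 0
--     for row in list_:
--         if row == 'caw caw':
--             result.append(_sum)
--             _sum = 0
--         else:
--             _sum += map_binary[row]
--     return result
-- ===== SOURCE B (Python) =====
-- def blink_crow(list_):
--     map_binary = {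
--         '---': 0,
--         '--*': 1,
--         '-*-': 2,
--         '-**': 3,
--         '*--': 4,
--         '*-*': 5,
--         '**-': 6,
--         '***': 7
--     }
--     # phase 1: translate every row up front (None marks the 'caw caw' sentinel)
--     vals = [None if row == 'caw caw' else map_binary[row] for row in list_]
--     # phase 2: partition at sentinels (dropping the unterminated tail) and sum each segment
--     groups = []
--     cur = []
--     for v in vals:
--         if v is None:
--             groups.append(cur)
--             cur = []
--         else:
--             cur.append(v)
--     return [sum(g) for g in groups]
-- ===== Notes on version B (the rewrite author's own statement) =====
-- stated objective: alternative
-- what changed: Replaces the single running-accumulator loop with a two-phase shape: a translation pass mapping every row to its binary value (None for the sentinel), then partitioning into segments at each sentinel (dropping the unterminated tail) and mapping a sum over the segments.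
import Mathlib
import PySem

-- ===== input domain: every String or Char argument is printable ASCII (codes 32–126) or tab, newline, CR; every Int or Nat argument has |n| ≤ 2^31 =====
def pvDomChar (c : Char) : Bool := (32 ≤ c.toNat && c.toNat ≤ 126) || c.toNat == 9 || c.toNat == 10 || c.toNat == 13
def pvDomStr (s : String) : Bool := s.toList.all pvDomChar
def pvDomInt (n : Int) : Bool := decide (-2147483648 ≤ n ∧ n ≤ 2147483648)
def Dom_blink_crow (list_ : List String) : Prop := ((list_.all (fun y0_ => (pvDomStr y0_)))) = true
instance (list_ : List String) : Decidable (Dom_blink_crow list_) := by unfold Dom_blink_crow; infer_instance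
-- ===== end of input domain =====

-- B replaces A's single running-accumulator loop by a two-phase group-then-reduce decomposition (same O(n) cost).


-- shared dict lookup (Python's map_binary[row]; none = KeyError, excluded by Pre_)
def mapBinary? (s : String) : Option Int :=
  if s = "---" then some 0
  else if s = "--*" then some 1
  else if s = "-*-" then some 2
  else if s = "-**" then some 3
  else if s = "*--" then some 4
  else if s = "*-*" then some 5
  else if s = "**-" then some 6
  else if s = "***" then some 7
  else none

-- ===== PORT A =====
-- A's loop: state (result, _sum); append _sum on 'caw caw', else add the lookup
def blinkLoopA : List String → List Int → Int → List Int
  | [], result, _ => result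
  | row :: rest, result, s =>
      if row = "caw caw" then blinkLoopA rest (result ++ [s]) 0
      else blinkLoopA rest result (s + (mapBinary? row).getD 0)

def blink_crow (list_ : List String) : List Int := blinkLoopA list_ [] 0

-- ===== PORT B =====
-- B phase 1: translate every row (none marks the sentinel; KeyError rows are excluded by Pre_)
def blinkVals (list_ : List String) : List (Option Int) :=
  list_.map (fun row => if row = "caw caw" then none else some ((mapBinary? row).getD 0))

-- B phase 2: partition translated values into segments at each sentinel (trailing tail dropped)
def blinkGroups : List (Option Int) → List (List Int) → List Int → List (List Int)
  | [], groups, _ => groups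
  | v :: rest, groups, cur =>
      match v with
      | none => blinkGroups rest (groups ++ [cur]) []
      | some x => blinkGroups rest groups (cur ++ [x])

-- Python's sum(g)
def segSum (g : List Int) : Int := g.foldl (· + ·) 0

def blink_crow_alt (list_ : List String) : List Int :=
  (blinkGroups (blinkVals list_) [] []).map segSum

-- ===== PRECONDITION & SPEC =====
-- Pre_ excludes exactly the rows not in map_binary and not 'caw caw', on which Python A raises KeyError.
def Pre_blink_crow (list_ : List String) : Prop :=
  ∀ r ∈ list_, r = "caw caw" ∨ mapBinary? r ≠ none
instance (list_ : List String) : Decidable (Pre_blink_crow list_) := by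
  unfold Pre_blink_crow; infer_instance

def pvWitness_blink_crow : List String := ["***", "---", "caw caw", "--*", "caw caw", "-*-"]

def Spec_blink_crow (list_ : List String) (out : List Int) : Prop := out = blink_crow_alt list_
instance (list_ : List String) (out : List Int) : Decidable (Spec_blink_crow list_ out) := by unfold Spec_blink_crow; infer_instance

-- ===== CLAIM (what is proved, stated in full; the proofs are below) =====
def Claim_equal_blink_crow : Prop := ∀ (list_ : List String), Dom_blink_crow list_ → Pre_blink_crow list_ → Spec_blink_crow list_ (blink_crow list_)

-- ===== LEMMAS AND PROOFS =====
theorem segSum_append_one (g : List Int) (x : Int) :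
    segSum (g ++ [x]) = segSum g + x := by
  simp [segSum, List.foldl_append]

theorem blinkLoop_eq_groups (l : List String) (gs : List (List Int)) (cur : List Int) :
    blinkLoopA l (gs.map segSum) (segSum cur) = (blinkGroups (blinkVals l) gs cur).map segSum := by
  induction l generalizing gs cur with
  | nil => rfl
  | cons row rest ih =>
      by_cases h : row = "caw caw"
      · have h1 : gs.map segSum ++ [segSum cur] = (gs ++ [cur]).map segSum := by
          simp
        have h2 : segSum ([] : List Int) = 0 := rfl
        simp only [blinkLoopA, blinkVals, List.map_cons, blinkGroups, h, if_true]
        rw [h1, ← h2]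
        exact ih (gs ++ [cur]) []
      · simp only [blinkLoopA, blinkVals, List.map_cons, blinkGroups, h, if_false]
        rw [← segSum_append_one]
        exact ih gs (cur ++ [(mapBinary? row).getD 0])

-- ===== VERDICT (by name: the statement is the Claim_ definition above) =====
theorem blink_crow_spec : Claim_equal_blink_crow := by
  intro list_ _ _
  unfold Spec_blink_crow blink_crow blink_crow_alt
  have := blinkLoop_eq_groups list_ [] []
  simpa [segSum] using this
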